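-- pv_equiv track=rewrite | github.com/Sky-Lance/pwn_challs | ctf/2024/CrewCTF24/shellcode_game_x640A/test.py | split_offset
-- ===== SOURCE A (Python) =====
-- def split_offset(offset):
--     result = []
--     while offset > 0:
--         if offset > 0x1f:
--             part = 0x1f
--         else:
--             part = offset
--         result.append(part)
--         offset -= part
--     return result
-- ===== SOURCE B (Python) =====
-- def split_offset(offset):
--     if offset <= 0:
--         return []
--     count, rem = divmod(offset, 0x1f)
--     return [0x1f] * count + ([rem] if rem else [])
-- ===== Notes on version B (the rewrite author's own statement) =====
-- stated objective: simpler
-- what changed: Replaces the repeated-subtraction loop with a closed-form divmod: count full 0x1f chunks plus the nonzero remainder.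
import Mathlib
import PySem

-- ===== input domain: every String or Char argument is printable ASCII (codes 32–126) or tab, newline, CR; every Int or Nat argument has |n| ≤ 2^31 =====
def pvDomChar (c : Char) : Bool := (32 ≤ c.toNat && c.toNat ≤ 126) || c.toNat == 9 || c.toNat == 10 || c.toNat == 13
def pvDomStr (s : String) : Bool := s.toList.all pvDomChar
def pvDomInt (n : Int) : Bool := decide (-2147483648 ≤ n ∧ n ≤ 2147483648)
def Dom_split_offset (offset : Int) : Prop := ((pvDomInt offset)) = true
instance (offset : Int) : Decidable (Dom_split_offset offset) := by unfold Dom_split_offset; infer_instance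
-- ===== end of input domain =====

-- ===== PORT A =====
-- B replaces the repeated-subtraction loop with a closed-form divmod (objective: simpler).
def split_offset (offset : Int) : List Int :=
  if _h : offset > 0 then
    let part : Int := if offset > 0x1f then 0x1f else offset
    part :: split_offset (offset - part)
  else []
termination_by offset.toNat
decreasing_by
  split_ifs with h1 <;> omega

-- ===== PORT B =====
def split_offset_alt (offset : Int) : List Int :=
  if offset ≤ 0 then []
  else
    let count := PySem.Int.floordiv offset 0x1f
    let rem := PySem.Int.mod offset 0x1f
    List.replicate count.toNat 0x1f ++ (if rem ≠ 0 then [rem] else [])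

-- ===== PRECONDITION & SPEC =====
def Spec_split_offset (offset : Int) (out : List Int) : Prop := out = split_offset_alt offset
instance (offset : Int) (out : List Int) : Decidable (Spec_split_offset offset out) := by unfold Spec_split_offset; infer_instance

-- ===== CLAIM (what is proved, stated in full; the proofs are below) =====
def Claim_equal_split_offset : Prop := ∀ (offset : Int), Dom_split_offset offset → Spec_split_offset offset (split_offset offset)

-- ===== LEMMAS AND PROOFS =====

-- ===== VERDICT (by name: the statement is the Claim_ definition above) =====
lemma fdiv31 (a : Int) : a.fdiv 31 = a / 31 :=
  Int.fdiv_eq_ediv_of_nonneg a (by norm_num)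

lemma fmod31 (a : Int) : a.fmod 31 = a % 31 := by
  rw [Int.fmod_def, fdiv31]; omega

lemma split_offset_eq_alt (offset : Int) : split_offset offset = split_offset_alt offset := by
  by_cases hpos : offset > 0
  · induction h : offset.toNat using Nat.strong_induction_on generalizing offset with
    | _ n ih =>
      rw [split_offset.eq_def]
      simp only [hpos, dif_pos]
      by_cases hbig : offset > 0x1f
      · have hrec := ih (offset - 0x1f).toNat (by omega) (offset - 0x1f) (by omega) rfl
        simp only [hbig, if_pos, hrec, split_offset_alt]
        have h1 : ¬ offset ≤ 0 := by omega
        have h2 : ¬ offset - 31 ≤ 0 := by omega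
        simp only [h1, h2, PySem.Int.floordiv, PySem.Int.mod, fdiv31, fmod31]
        have hd : offset / 31 = (offset - 31) / 31 + 1 := by omega
        have hm : offset % 31 = (offset - 31) % 31 := by omega
        have hc : (offset / 31).toNat = ((offset - 31) / 31).toNat + 1 := by omega
        rw [hm, hc, List.replicate_succ]
        simp
      · -- 0 < offset ≤ 31 : one last chunk
        rw [split_offset.eq_def]
        simp only [hbig]
        have hstop : ¬ offset - offset > 0 := by omega
        simp only [split_offset_alt]
        have h1 : ¬ offset ≤ 0 := by omega
        simp only [h1, PySem.Int.floordiv, PySem.Int.mod, fdiv31, fmod31]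
        by_cases h31 : offset = 31
        · subst h31; decide
        · have hd : offset / 31 = 0 := Int.ediv_eq_zero_of_lt (by omega) (by omega)
          have hm : offset % 31 = offset := Int.emod_eq_of_lt (by omega) (by omega)
          have hne : offset % 31 ≠ 0 := by omega
          simp only [hd, hm, Int.toNat_zero, List.replicate_zero, List.nil_append]
          have : ¬ offset = 0 := by omega
          simp [this]
  · rw [split_offset, split_offset_alt]
    simp only [hpos]
    have : offset ≤ 0 := by omega
    simp [this]

theorem split_offset_spec : Claim_equal_split_offset := by
  intro offset _
  unfold Spec_split_offset
  exact split_offset_eq_alt offset
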